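-- pv_equiv track=rewrite | github.com/cpp-rakesh/code_wars | kata/5kyu/numbers_with_the_highest_amount_of_divisors.py | proc_arrInt
-- ===== SOURCE A (Python) =====
-- import math
--
-- def is_prime(n):
--     if n < 2:
--         return False
--     for i in range(2, int(math.sqrt(n)) + 1):
--         if n % i == 0:
--             return False
--     return True
--
-- def divisors(n):
--     c = 2
--     for i in range(2, int(math.sqrt(n)) + 1):
--         k = int(n / i)
--         if n % i == 0:
--             c = c + 1
--         if k != i and n % k == 0:
--             c = c + 1
--     return c
--
-- def proc_arrInt(l):
--     m = 0
--     r = []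
--     p = 0
--     for n in l:
--         if is_prime(n):
--             p = p + 1
--         d = divisors(n)
--         if d == m:
--             r.append(n)
--         elif d > m:
--             m = d
--             r = []
--             r.append(n)
--     r.sort()
--     return [len(l), p, [m, r]]
-- ===== SOURCE B (Python) =====
-- import math
--
-- def is_prime(n):
--     if n < 2:
--         return False
--     for i in range(2, int(math.sqrt(n)) + 1):
--         if n % i == 0:
--             return False
--     return True
--
-- def divisors(n):
--     c = 2
--     for i in range(2, int(math.sqrt(n)) + 1):
--         k = int(n / i)
--         if n % i == 0:
--             c = c + 1
--         if k != i and n % k == 0: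
--             c = c + 1
--     return c
--
-- def proc_arrInt(l):
--     counts = [divisors(n) for n in l]
--     p = len([n for n in l if is_prime(n)])
--     m = max(counts) if counts else 0
--     r = sorted(n for n, d in zip(l, counts) if d == m)
--     return [len(l), p, [m, r]]
-- ===== Notes on version B (the rewrite author's own statement) =====
-- stated objective: alternative
-- what changed: A's single accumulating pass with a running maximum that resets the result list is replaced by a two-phase shape: compute all divisor counts and the prime count first, then take max(counts) and select the matching elements by a zip-filter.
import Mathlib
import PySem

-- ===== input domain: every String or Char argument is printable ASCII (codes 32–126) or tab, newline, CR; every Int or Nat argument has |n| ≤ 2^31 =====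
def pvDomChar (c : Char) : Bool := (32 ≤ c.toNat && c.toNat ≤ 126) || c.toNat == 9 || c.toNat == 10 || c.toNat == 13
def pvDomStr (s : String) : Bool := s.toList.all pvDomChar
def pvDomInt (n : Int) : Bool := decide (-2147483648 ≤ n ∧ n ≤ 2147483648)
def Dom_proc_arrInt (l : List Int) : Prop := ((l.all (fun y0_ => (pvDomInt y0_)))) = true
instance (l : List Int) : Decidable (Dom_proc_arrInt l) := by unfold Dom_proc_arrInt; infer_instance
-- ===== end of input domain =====

-- B replaces A's single accumulating pass (running max with reset) by a two-phase
-- compute-all-counts-then-select shape (objective: alternative decomposition, same cost).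

-- ===== PORT A =====
-- int(math.sqrt(n)): on Dom (0 ≤ n ≤ 2^31) the double sqrt is exact enough that this equals Nat.sqrt.
def pySqrtInt (n : Int) : Int := (Nat.sqrt n.toNat : Int)

def py_is_prime (n : Int) : Bool :=
  if n < 2 then false
  else (PySem.List.pyRange 2 (pySqrtInt n + 1) 1).all (fun i => !(PySem.Int.mod n i == 0))

def py_divisors (n : Int) : Int :=
  (PySem.List.pyRange 2 (pySqrtInt n + 1) 1).foldl (fun c i =>
    let k := PySem.Int.truncdiv n i    -- k = int(n / i); PySem.Int.truncdiv is exact for |n| < 2^53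
    let c := if PySem.Int.mod n i == 0 then c + 1 else c
    if k != i && PySem.Int.mod n k == 0 then c + 1 else c) 2

def proc_arrInt (l : List Int) : Int × Int × (Int × List Int) :=
  let s := l.foldl (fun (st : Int × List Int × Int) n =>
    let p := if py_is_prime n then st.2.2 + 1 else st.2.2
    let d := py_divisors n
    if d == st.1 then (st.1, st.2.1 ++ [n], p)
    else if d > st.1 then (d, [n], p)
    else (st.1, st.2.1, p)) (0, [], 0)
  ((l.length : Int), s.2.2, (s.1, PySem.List.sorted s.2.1 (fun x => x) false))

-- ===== PORT B =====
def proc_arrInt_alt (l : List Int) : Int × Int × (Int × List Int) :=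
  let counts := l.map py_divisors
  let p : Int := ((l.filter (fun n => py_is_prime n)).length : Int)
  let m : Int := if counts.isEmpty then 0 else (PySem.List.max? counts (fun x => x)).getD 0
  let r := PySem.List.sorted (((l.zip counts).filter (fun nd => nd.2 == m)).map Prod.fst)
             (fun x => x) false
  ((l.length : Int), p, (m, r))

-- ===== PRECONDITION & SPEC =====
-- A raises ValueError (math.sqrt of a negative) on any list containing a negative number; B's
-- helpers are A's, so they would raise there too.
def Pre_proc_arrInt (l : List Int) : Prop := ∀ n ∈ l, 0 ≤ n
instance (l : List Int) : Decidable (Pre_proc_arrInt l) := by unfold Pre_proc_arrInt; infer_instance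

def pvWitness_proc_arrInt : List Int := [12, 7, 0, 18, 18, 1]

def Spec_proc_arrInt (l : List Int) (out : Int × Int × (Int × List Int)) : Prop :=
  out = proc_arrInt_alt l
instance (l : List Int) (out : Int × Int × (Int × List Int)) : Decidable (Spec_proc_arrInt l out) := by
  unfold Spec_proc_arrInt; infer_instance

-- ===== CLAIM =====
def Claim_equal_proc_arrInt : Prop :=
  ∀ (l : List Int), Dom_proc_arrInt l → Pre_proc_arrInt l → Spec_proc_arrInt l (proc_arrInt l)

-- ===== LEMMAS AND PROOFS =====

-- the running max of divisor counts, seeded with m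
def pvRunMax (m : Int) (l : List Int) : Int := l.foldl (fun m n => max m (py_divisors n)) m

theorem py_divisors_ge_two (n : Int) : 2 ≤ py_divisors n := by
  unfold py_divisors
  have h : ∀ (xs : List Int) (c : Int), c ≤ xs.foldl (fun c i =>
      let k := PySem.Int.truncdiv n i
      let c := if PySem.Int.mod n i == 0 then c + 1 else c
      if k != i && PySem.Int.mod n k == 0 then c + 1 else c) c := by
    intro xs
    induction xs with
    | nil => intro c; simp
    | cons x t ih =>
      intro c
      refine le_trans ?_ (ih _)
      dsimp only
      split_ifs <;> omega
  exact h _ 2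

theorem pvRunMax_le (l : List Int) : ∀ m : Int, m ≤ pvRunMax m l := by
  induction l with
  | nil => intro m; simp [pvRunMax]
  | cons n t ih =>
    intro m
    have := ih (max m (py_divisors n))
    simp only [pvRunMax, List.foldl_cons] at this ⊢
    exact le_trans (le_max_left _ _) this

-- characterisation of A's accumulating loop
theorem loopA_char (l : List Int) : ∀ (m : Int) (r : List Int) (p : Int),
    l.foldl (fun (st : Int × List Int × Int) n =>
      let p := if py_is_prime n then st.2.2 + 1 else st.2.2
      let d := py_divisors n
      if d == st.1 then (st.1, st.2.1 ++ [n], p)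
      else if d > st.1 then (d, [n], p)
      else (st.1, st.2.1, p)) (m, r, p)
    = (pvRunMax m l,
       (if pvRunMax m l = m then r else []) ++ l.filter (fun n => py_divisors n == pvRunMax m l),
       p + (l.countP (fun n => py_is_prime n) : Int)) := by
  induction l with
  | nil => intro m r p; simp [pvRunMax]
  | cons n t ih =>
    intro m r p
    have hM : pvRunMax m (n :: t) = pvRunMax (max m (py_divisors n)) t := by
      simp [pvRunMax]
    simp only [List.foldl_cons]
    by_cases hd : py_divisors n = m
    · -- d == m branch
      have hmax : max m (py_divisors n) = m := by omega
      have hb : (py_divisors n == m) = true := by simp [hd]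
      rw [if_pos hb, ih m (r ++ [n]) (if py_is_prime n then p + 1 else p)]
      rw [hM, hmax]
      refine Prod.ext rfl (Prod.ext ?_ ?_)
      · by_cases hMm : pvRunMax m t = m
        · simp [hMm, hd]
        · have : ¬ (py_divisors n == pvRunMax m t) = true := by simp [hd]; omega
          simp [hMm, this]
      · simp [List.countP_cons]
        split_ifs <;> omega
    · by_cases hgt : py_divisors n > m
      · -- d > m branch: reset
        have hmax : max m (py_divisors n) = py_divisors n := by omega
        have hb : ¬ ((py_divisors n == m) = true) := by simp [hd]
        rw [if_neg hb, if_pos hgt, ih (py_divisors n) [n] (if py_is_prime n then p + 1 else p)]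
        rw [hM, hmax]
        have hge : py_divisors n ≤ pvRunMax (py_divisors n) t := pvRunMax_le t _
        have hMm : pvRunMax (py_divisors n) t ≠ m := by omega
        refine Prod.ext rfl (Prod.ext ?_ ?_)
        · by_cases hMd : pvRunMax (py_divisors n) t = py_divisors n
          · simp [hMd, hd]
          · have : ¬ (py_divisors n == pvRunMax (py_divisors n) t) = true := by
              simp; omega
            simp [hMm, hMd, this]
        · simp [List.countP_cons]
          split_ifs <;> omega
      · -- d < m branch: skip
        have hmax : max m (py_divisors n) = m := by omega
        have hb : ¬ ((py_divisors n == m) = true) := by simp [hd]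
        rw [if_neg hb, if_neg hgt, ih m r (if py_is_prime n then p + 1 else p)]
        rw [hM, hmax]
        have hge : m ≤ pvRunMax m t := pvRunMax_le t _
        have hne : ¬ (py_divisors n == pvRunMax m t) = true := by simp; omega
        refine Prod.ext rfl (Prod.ext ?_ ?_)
        · simp [hne]
        · simp [List.countP_cons]
          split_ifs <;> omega

-- B's zip-with-own-map filter is a plain filter
theorem zip_map_filter (l : List Int) (m : Int) :
    ((l.zip (l.map py_divisors)).filter (fun nd => nd.2 == m)).map Prod.fst
      = l.filter (fun n => py_divisors n == m) := by
  induction l with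
  | nil => rfl
  | cons n t ih =>
    simp only [List.map_cons, List.zip_cons_cons, List.filter_cons]
    by_cases h : (py_divisors n == m) = true
    · simp [h, ih]
    · simp [h, ih]

-- B's max(counts) is A's running max seeded with 0
theorem maxB_eq_runMax (l : List Int) (h : l ≠ []) :
    (PySem.List.max? (l.map py_divisors) (fun x => x)).getD 0 = pvRunMax 0 l := by
  cases l with
  | nil => exact absurd rfl h
  | cons n t =>
    rw [List.map_cons, PySem.List.max?_id_cons]
    have h0 : max 0 (py_divisors n) = py_divisors n := by
      have := py_divisors_ge_two n; omega
    simp only [Option.getD_some, pvRunMax, List.foldl_cons, h0, List.foldl_map]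

-- ===== VERDICT =====
theorem proc_arrInt_spec : Claim_equal_proc_arrInt := by
  intro l _ _
  unfold Spec_proc_arrInt proc_arrInt proc_arrInt_alt
  cases l with
  | nil => decide
  | cons n t =>
    have hne : (n :: t) ≠ ([] : List Int) := by simp
    rw [loopA_char (n :: t) 0 [] 0]
    have hie : (List.map py_divisors (n :: t)).isEmpty = false := rfl
    simp only [zip_map_filter, maxB_eq_runMax _ hne, hie, Bool.false_eq_true, if_false,
      List.countP_eq_length_filter, ite_self, List.nil_append, zero_add]
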